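-- pv_equiv track=rewrite | github.com/alexey-oblaukhov/Reed-Muller-classification | Codewords_16_analysis.py | does_have_3flat
-- ===== SOURCE A (Python) =====
-- def does_have_3flat(A):
--
--     output = []
--
--     #We pick the first vector (arbitrary vector), and try to construct
--     #all possible 1-, 2- and then 3-flats which contain it.
--     #If we succeed to find a 3-flat, we return 'True'
--     v_b = A[0]
--     flat = [v_b]
--
--     for v_1 in A:
--         if v_1 in flat:
--             continue
--
--         flat.append(v_1)
--         diff_1 = v_1^v_b
--
--         for v_2 in A:
--             if v_2 in flat:
--               continue
--             if (v_2^diff_1) not in A: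
--               continue
--             flat.append(v_2)
--             flat.append(v_2^diff_1)
--             diff_2 = v_2^v_b
--
--             for v_3 in A:
--                 if v_3 in flat:
--                     continue
--                 if ((v_3^diff_1) not in A) or ((v_3^diff_2) not in A) or ((v_3^diff_1^diff_2) not in A):
--                     continue
--
--                 #If we have reached this point, v_b + <v_1,v_2,v_3> form a 3-flat
--                 return True
--
--             flat.pop()
--             flat.pop()
--
--         flat.pop()
--
--     return False
-- ===== SOURCE B (Python) =====
-- def does_have_3flat(A):
--     # Span-growing search: a 3-flat through A[0] is a 3-dimensional linear
--     # subspace of the direction set D = {a ^ A[0] for a in A}.  Grow subspaces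
--     # one dimension at a time: extend a subspace S by a direction e whose whole
--     # coset {e ^ s for s in S} also lies in D, recursing until 3 dimensions.
--     v_b = A[0]
--     D = {a ^ v_b for a in A}
--
--     def grow(S, k):
--         # S: a linear subspace (as a set) contained in D; add k more dimensions.
--         if k == 0:
--             return True
--         for e in D:
--             if e in S:
--                 continue
--             coset = {e ^ s for s in S}
--             if coset <= D and grow(S | coset, k - 1):
--                 return True
--         return False
--
--     return grow({0}, 3)
-- ===== Notes on version B (the rewrite author's own statement) =====
-- stated objective: faster
-- what changed: Replaced A's triple-nested backtracking vector search with a flat push/pop stack by a recursive span-growing algorithm: shift once into direction space D = {a ^ A[0]}, then grow linear subspaces dimension by dimension, extending a subspace S by a direction e only if the whole coset {e ^ s for s in S} lies in D, until 3 dimensions are reached.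
import Mathlib
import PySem

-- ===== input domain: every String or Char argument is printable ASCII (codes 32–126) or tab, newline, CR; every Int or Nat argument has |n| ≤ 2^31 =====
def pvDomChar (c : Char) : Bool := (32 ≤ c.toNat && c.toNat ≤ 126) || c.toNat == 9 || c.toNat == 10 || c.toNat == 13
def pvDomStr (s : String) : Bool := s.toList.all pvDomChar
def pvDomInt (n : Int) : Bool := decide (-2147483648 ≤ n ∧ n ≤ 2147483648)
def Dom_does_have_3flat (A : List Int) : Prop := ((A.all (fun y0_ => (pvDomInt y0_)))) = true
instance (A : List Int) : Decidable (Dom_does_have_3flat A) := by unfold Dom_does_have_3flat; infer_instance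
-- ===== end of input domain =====

-- B replaces A's triple-nested backtracking vector search (flat push/pop stack) by a
-- recursive span-growing algorithm over the direction set D = {a ^ A[0]}: grow linear
-- subspaces one dimension at a time via coset-closure checks (measured faster at the timed sizes).

-- ===== PORT A =====
-- innermost loop: for v_3 in A (flat is [v_b, v_1, v_2, v_2^diff_1] here)
def dhfLoop3 (Aall flat : List Int) (diff1 diff2 : Int) : List Int → Bool
  | [] => false
  | v3 :: rest =>
    if flat.contains v3 then dhfLoop3 Aall flat diff1 diff2 rest
    else if !(Aall.contains (PySem.Int.bxor v3 diff1))
           || !(Aall.contains (PySem.Int.bxor v3 diff2))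
           || !(Aall.contains (PySem.Int.bxor (PySem.Int.bxor v3 diff1) diff2)) then
      dhfLoop3 Aall flat diff1 diff2 rest
    else true

-- middle loop: for v_2 in A (flat is [v_b, v_1]; append v_2, v_2^diff_1, pop both on failure)
def dhfLoop2 (Aall : List Int) (v_b : Int) (flat : List Int) (diff1 : Int) : List Int → Bool
  | [] => false
  | v2 :: rest =>
    if flat.contains v2 then dhfLoop2 Aall v_b flat diff1 rest
    else if !(Aall.contains (PySem.Int.bxor v2 diff1)) then dhfLoop2 Aall v_b flat diff1 rest
    else if dhfLoop3 Aall (flat ++ [v2, PySem.Int.bxor v2 diff1]) diff1 (PySem.Int.bxor v2 v_b) Aall then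
      true
    else dhfLoop2 Aall v_b flat diff1 rest

-- outer loop: for v_1 in A (flat is [v_b]; append v_1, pop on failure)
def dhfLoop1 (Aall : List Int) (v_b : Int) (flat : List Int) : List Int → Bool
  | [] => false
  | v1 :: rest =>
    if flat.contains v1 then dhfLoop1 Aall v_b flat rest
    else if dhfLoop2 Aall v_b (flat ++ [v1]) (PySem.Int.bxor v1 v_b) Aall then true
    else dhfLoop1 Aall v_b flat rest

def does_have_3flat (A : List Int) : Bool :=
  match PySem.List.pyGet? A 0 with
  | none => false            -- Python: A[0] raises IndexError; excluded by Pre_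
  | some v_b => dhfLoop1 A v_b [v_b] A

-- ===== PORT B =====
-- grow(S, k): S is a linear subspace (as a set) contained in D; add k more
-- dimensions. k counts down from the literal 3 and is never negative: ported as Nat.
def growB (D : PySem.Set Int) (S : PySem.Set Int) : Nat → Bool
  | 0 => true
  | Nat.succ k =>
    D.any fun e =>
      if PySem.Set.contains S e then false
      else
        let coset : PySem.Set Int := PySem.Set.ofList (S.map (fun s => PySem.Int.bxor e s))
        PySem.Set.issubset coset D && growB D (PySem.Set.union S coset) k

def does_have_3flat_alt (A : List Int) : Bool :=
  match PySem.List.pyGet? A 0 with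
  | none => false            -- Python: A[0] raises IndexError; excluded by Pre_
  | some v_b =>
    let D : PySem.Set Int := PySem.Set.ofList (A.map (fun a => PySem.Int.bxor a v_b))
    growB D (PySem.Set.ofList [0]) 3

-- ===== PRECONDITION & SPEC =====
-- Pre_ excludes only the empty list, on which Python's A[0] raises IndexError (in both A and B).
def Pre_does_have_3flat (A : List Int) : Prop := A ≠ []
instance (A : List Int) : Decidable (Pre_does_have_3flat A) := by unfold Pre_does_have_3flat; infer_instance
def pvWitness_does_have_3flat : List Int := [0]

def Spec_does_have_3flat (A : List Int) (out : Bool) : Prop := out = does_have_3flat_alt A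
instance (A : List Int) (out : Bool) : Decidable (Spec_does_have_3flat A out) := by unfold Spec_does_have_3flat; infer_instance

-- ===== CLAIM (what is proved, stated in full; the proofs are below) =====
def Claim_equal_does_have_3flat : Prop := ∀ (A : List Int), Dom_does_have_3flat A → Pre_does_have_3flat A → Spec_does_have_3flat A (does_have_3flat A)

-- ===== LEMMAS AND PROOFS =====

-- xor algebra on PySem.Int.bxor
theorem bx_eq_xor (a b : Int) : PySem.Int.bxor a b = Int.xor a b := by
  cases a <;> cases b <;>
    simp [PySem.Int.bxor, Int.xor, Int.negSucc_eq] <;> omega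

theorem bx_assoc (a b c : Int) :
    PySem.Int.bxor (PySem.Int.bxor a b) c = PySem.Int.bxor a (PySem.Int.bxor b c) := by
  simp only [bx_eq_xor]
  cases a <;> cases b <;> cases c <;> simp [Int.xor, Nat.xor_assoc]

theorem bx_cancel_right (a b c : Int) :
    PySem.Int.bxor a c = PySem.Int.bxor b c ↔ a = b := by
  constructor
  · intro h
    have h2 := congrArg (fun x => PySem.Int.bxor x c) h
    simpa [bx_assoc, PySem.Int.bxor_self, PySem.Int.bxor_zero] using h2
  · intro h; rw [h]

theorem bx_eq_zero_iff (a b : Int) : PySem.Int.bxor a b = 0 ↔ a = b := by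
  rw [show (0 : Int) = PySem.Int.bxor b b from (PySem.Int.bxor_self b).symm, bx_cancel_right]

theorem bx_swap_right (x d b : Int) :
    PySem.Int.bxor (PySem.Int.bxor x d) b = PySem.Int.bxor (PySem.Int.bxor x b) d := by
  rw [bx_assoc, bx_assoc, PySem.Int.bxor_comm d b]

-- characterizations of A's loops
theorem dhfLoop3_iff (Aall flat : List Int) (d1 d2 : Int) (L : List Int) :
    dhfLoop3 Aall flat d1 d2 L = true ↔
      ∃ v3 ∈ L, v3 ∉ flat ∧ PySem.Int.bxor v3 d1 ∈ Aall ∧ PySem.Int.bxor v3 d2 ∈ Aall ∧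
        PySem.Int.bxor (PySem.Int.bxor v3 d1) d2 ∈ Aall := by
  induction L with
  | nil => simp [dhfLoop3]
  | cons v3 rest ih =>
    simp only [dhfLoop3]
    split_ifs with h1 h2
    · simp only [ih, List.mem_cons]
      constructor
      · rintro ⟨v, hv, h⟩; exact ⟨v, Or.inr hv, h⟩
      · rintro ⟨v, hv | hv, h⟩
        · exact absurd (by simpa using h1) (by simpa [hv] using h.1)
        · exact ⟨v, hv, h⟩
    · simp only [ih, List.mem_cons]
      simp only [Bool.or_eq_true, Bool.not_eq_true', List.contains_eq_mem, decide_eq_false_iff_not] at h2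
      constructor
      · rintro ⟨v, hv, h⟩; exact ⟨v, Or.inr hv, h⟩
      · rintro ⟨v, hv | hv, h⟩
        · subst hv; tauto
        · exact ⟨v, hv, h⟩
    · simp only [Bool.or_eq_true, Bool.not_eq_true', List.contains_eq_mem, decide_eq_false_iff_not] at h2
      refine iff_of_true rfl ⟨v3, List.mem_cons_self, ?_, ?_, ?_, ?_⟩ <;>
        first
          | (simpa [List.contains_eq_mem] using h1)
          | tauto

theorem dhfLoop2_iff (Aall : List Int) (v_b : Int) (flat : List Int) (d1 : Int) (L : List Int) :
    dhfLoop2 Aall v_b flat d1 L = true ↔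
      ∃ v2 ∈ L, v2 ∉ flat ∧ PySem.Int.bxor v2 d1 ∈ Aall ∧
        dhfLoop3 Aall (flat ++ [v2, PySem.Int.bxor v2 d1]) d1 (PySem.Int.bxor v2 v_b) Aall = true := by
  induction L with
  | nil => simp [dhfLoop2]
  | cons v2 rest ih =>
    simp only [dhfLoop2]
    split_ifs with h1 h2 h3
    · simp only [ih, List.mem_cons]
      constructor
      · rintro ⟨v, hv, h⟩; exact ⟨v, Or.inr hv, h⟩
      · rintro ⟨v, hv | hv, h⟩
        · exact absurd (by simpa using h1) (by simpa [hv] using h.1)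
        · exact ⟨v, hv, h⟩
    · simp only [Bool.not_eq_true', List.contains_eq_mem, decide_eq_false_iff_not] at h2
      simp only [ih, List.mem_cons]
      constructor
      · rintro ⟨v, hv, h⟩; exact ⟨v, Or.inr hv, h⟩
      · rintro ⟨v, hv | hv, h⟩
        · subst hv; exact absurd h.2.1 h2
        · exact ⟨v, hv, h⟩
    · refine iff_of_true rfl ⟨v2, List.mem_cons_self, ?_, ?_, h3⟩
      · simpa [List.contains_eq_mem] using h1
      · simpa [List.contains_eq_mem] using h2
    · simp only [ih, List.mem_cons]
      constructor
      · rintro ⟨v, hv, h⟩; exact ⟨v, Or.inr hv, h⟩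
      · rintro ⟨v, hv | hv, h⟩
        · subst hv; exact absurd h.2.2 h3
        · exact ⟨v, hv, h⟩

theorem dhfLoop1_iff (Aall : List Int) (v_b : Int) (flat : List Int) (L : List Int) :
    dhfLoop1 Aall v_b flat L = true ↔
      ∃ v1 ∈ L, v1 ∉ flat ∧
        dhfLoop2 Aall v_b (flat ++ [v1]) (PySem.Int.bxor v1 v_b) Aall = true := by
  induction L with
  | nil => simp [dhfLoop1]
  | cons v1 rest ih =>
    simp only [dhfLoop1]
    split_ifs with h1 h2
    · simp only [ih, List.mem_cons]
      constructor
      · rintro ⟨v, hv, h⟩; exact ⟨v, Or.inr hv, h⟩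
      · rintro ⟨v, hv | hv, h⟩
        · exact absurd (by simpa using h1) (by simpa [hv] using h.1)
        · exact ⟨v, hv, h⟩
    · refine iff_of_true rfl ⟨v1, List.mem_cons_self, ?_, h2⟩
      simpa [List.contains_eq_mem] using h1
    · simp only [ih, List.mem_cons]
      constructor
      · rintro ⟨v, hv, h⟩; exact ⟨v, Or.inr hv, h⟩
      · rintro ⟨v, hv | hv, h⟩
        · subst hv; exact absurd h.2 h2
        · exact ⟨v, hv, h⟩

theorem bx_shift2 (x y b : Int) :
    PySem.Int.bxor (PySem.Int.bxor x (PySem.Int.bxor y b)) b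
      = PySem.Int.bxor (PySem.Int.bxor y b) (PySem.Int.bxor x b) := by
  rw [bx_swap_right, PySem.Int.bxor_comm]

theorem bx_shift3 (x y z b : Int) :
    PySem.Int.bxor (PySem.Int.bxor (PySem.Int.bxor x (PySem.Int.bxor y b)) (PySem.Int.bxor z b)) b
      = PySem.Int.bxor (PySem.Int.bxor (PySem.Int.bxor y b) (PySem.Int.bxor z b)) (PySem.Int.bxor x b) := by
  rw [bx_swap_right, bx_shift2, bx_swap_right]

-- the common middle ground: "D contains three independent closed directions"
def dirSet (A : List Int) (v_b : Int) : PySem.Set Int :=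
  PySem.Set.ofList (A.map (fun a => PySem.Int.bxor a v_b))

def Phi3 (A : List Int) (v_b : Int) : Prop :=
  ∃ d1, d1 ∈ dirSet A v_b ∧ d1 ≠ 0 ∧
    ∃ d2, d2 ∈ dirSet A v_b ∧ d2 ≠ 0 ∧ d2 ≠ d1 ∧ PySem.Int.bxor d1 d2 ∈ dirSet A v_b ∧
      ∃ d3, d3 ∈ dirSet A v_b ∧ d3 ≠ 0 ∧ d3 ≠ d1 ∧ d3 ≠ d2 ∧ d3 ≠ PySem.Int.bxor d1 d2 ∧
        PySem.Int.bxor d1 d3 ∈ dirSet A v_b ∧ PySem.Int.bxor d2 d3 ∈ dirSet A v_b ∧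
        PySem.Int.bxor (PySem.Int.bxor d1 d2) d3 ∈ dirSet A v_b

-- membership bridge: x ∈ A ↔ x ⊕ v_b ∈ dirSet
theorem mem_dir (A : List Int) (v_b x : Int) :
    PySem.Int.bxor x v_b ∈ dirSet A v_b ↔ x ∈ A := by
  rw [dirSet, PySem.Set.mem_ofList, List.mem_map]
  constructor
  · rintro ⟨a, ha, h⟩; rwa [(bx_cancel_right x a v_b).mp h.symm]
  · intro h; exact ⟨x, h, rfl⟩

theorem mem_dir' (A : List Int) (v_b x : Int) :
    x ∈ dirSet A v_b ↔ ∃ v ∈ A, PySem.Int.bxor v v_b = x := by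
  rw [dirSet, PySem.Set.mem_ofList, List.mem_map]

theorem bx_ne_iff (x y b : Int) : PySem.Int.bxor x b ≠ PySem.Int.bxor y b ↔ x ≠ y :=
  not_congr (bx_cancel_right x y b)

theorem bx_ne_zero_iff (x b : Int) : PySem.Int.bxor x b ≠ 0 ↔ x ≠ b :=
  not_congr (bx_eq_zero_iff x b)

-- A's search succeeds exactly when three independent closed directions exist
theorem a_iff_phi (v_b : Int) (rest : List Int) :
    does_have_3flat (v_b :: rest) = true ↔ Phi3 (v_b :: rest) v_b := by
  have hA : PySem.List.pyGet? (v_b :: rest) 0 = some v_b := by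
    simp [PySem.List.pyGet?, PySem.List.pyIdx?]
  unfold does_have_3flat Phi3
  rw [hA]
  set S := v_b :: rest with hS
  simp only [dhfLoop1_iff, dhfLoop2_iff, dhfLoop3_iff, List.cons_append, List.nil_append,
    List.mem_cons, List.not_mem_nil, or_false, not_or]
  constructor
  · rintro ⟨v1, hv1S, hv1b, v2, hv2S, ⟨hv2b, hv21⟩, hv2c, v3, hv3S,
      ⟨hv3b, hv31, hv32, hv3p⟩, hc1, hc2, hc3⟩
    refine ⟨PySem.Int.bxor v1 v_b, (mem_dir _ v_b v1).mpr hv1S,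
      (bx_ne_zero_iff v1 v_b).mpr hv1b,
      PySem.Int.bxor v2 v_b, (mem_dir _ v_b v2).mpr hv2S,
      (bx_ne_zero_iff v2 v_b).mpr hv2b, (bx_ne_iff v2 v1 v_b).mpr hv21, ?_,
      PySem.Int.bxor v3 v_b, (mem_dir _ v_b v3).mpr hv3S,
      (bx_ne_zero_iff v3 v_b).mpr hv3b, (bx_ne_iff v3 v1 v_b).mpr hv31,
      (bx_ne_iff v3 v2 v_b).mpr hv32, ?_, ?_, ?_, ?_⟩
    · have h := (mem_dir _ v_b _).mpr hv2c
      rwa [bx_shift2] at h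
    · have h := (bx_ne_iff v3 (PySem.Int.bxor v2 (PySem.Int.bxor v1 v_b)) v_b).mpr hv3p
      rwa [bx_shift2] at h
    · have h := (mem_dir _ v_b _).mpr hc1
      rwa [bx_shift2] at h
    · have h := (mem_dir _ v_b _).mpr hc2
      rwa [bx_shift2] at h
    · have h := (mem_dir _ v_b _).mpr hc3
      rwa [bx_shift3] at h
  · rintro ⟨d1, hd1D, hd1z, d2, hd2D, hd2z, hd21, hdc, d3, hd3D,
      hd3z, hd31, hd32, hd3p, he1, he2, he3⟩
    obtain ⟨v1, hv1S, rfl⟩ := (mem_dir' _ v_b d1).mp hd1D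
    obtain ⟨v2, hv2S, rfl⟩ := (mem_dir' _ v_b d2).mp hd2D
    obtain ⟨v3, hv3S, rfl⟩ := (mem_dir' _ v_b d3).mp hd3D
    refine ⟨v1, hv1S, (bx_ne_zero_iff v1 v_b).mp hd1z,
      v2, hv2S, ⟨(bx_ne_zero_iff v2 v_b).mp hd2z, (bx_ne_iff v2 v1 v_b).mp hd21⟩, ?_,
      v3, hv3S, ⟨(bx_ne_zero_iff v3 v_b).mp hd3z, (bx_ne_iff v3 v1 v_b).mp hd31,
        (bx_ne_iff v3 v2 v_b).mp hd32, ?_⟩, ?_, ?_, ?_⟩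
    · rw [← bx_shift2] at hdc
      exact (mem_dir _ v_b _).mp hdc
    · rw [← bx_shift2] at hd3p
      exact (bx_ne_iff v3 (PySem.Int.bxor v2 (PySem.Int.bxor v1 v_b)) v_b).mp hd3p
    · rw [← bx_shift2] at he1
      exact (mem_dir _ v_b _).mp he1
    · rw [← bx_shift2] at he2
      exact (mem_dir _ v_b _).mp he2
    · rw [← bx_shift3] at he3
      exact (mem_dir _ v_b _).mp he3

-- one unrolling step of B's span-growing recursion
theorem growB_succ (D S : PySem.Set Int) (k : Nat) :
    growB D S (k + 1) = true ↔
      ∃ e ∈ D, e ∉ S ∧ (∀ s ∈ S, PySem.Int.bxor e s ∈ D) ∧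
        growB D (PySem.Set.union S (PySem.Set.ofList (S.map (fun s => PySem.Int.bxor e s)))) k = true := by
  show (D.any _) = true ↔ _
  simp only [List.any_eq_true]
  constructor
  · rintro ⟨e, heD, he⟩
    by_cases hmem : PySem.Set.contains S e = true
    · rw [if_pos hmem] at he; cases he
    · rw [if_neg hmem] at he
      simp only [Bool.and_eq_true, PySem.Set.issubset_iff] at he
      refine ⟨e, heD, by simpa using hmem, ?_, he.2⟩
      intro s hs
      exact he.1 _ (by rw [PySem.Set.mem_ofList, List.mem_map]; exact ⟨s, hs, rfl⟩)
  · rintro ⟨e, heD, heS, hcl, hrec⟩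
    refine ⟨e, heD, ?_⟩
    rw [if_neg (by simpa using heS)]
    simp only [Bool.and_eq_true, PySem.Set.issubset_iff]
    refine ⟨?_, hrec⟩
    intro x hx
    rw [PySem.Set.mem_ofList, List.mem_map] at hx
    obtain ⟨s, hs, rfl⟩ := hx
    exact hcl s hs

theorem growB_zero (D S : PySem.Set Int) : growB D S 0 = true := rfl

theorem does_have_3flat_tail_eq (A : List Int) :
    does_have_3flat_alt A = true ↔
      match PySem.List.pyGet? A 0 with
      | none => False
      | some v_b => growB (dirSet A v_b) (PySem.Set.ofList [0]) 3 = true := by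
  unfold does_have_3flat_alt dirSet
  cases PySem.List.pyGet? A 0 <;> simp

-- B's search succeeds exactly when three independent closed directions exist
theorem b_iff_phi (v_b : Int) (rest : List Int) :
    does_have_3flat_alt (v_b :: rest) = true ↔ Phi3 (v_b :: rest) v_b := by
  have hA : PySem.List.pyGet? (v_b :: rest) 0 = some v_b := by
    simp [PySem.List.pyGet?, PySem.List.pyIdx?]
  rw [does_have_3flat_tail_eq, hA]
  set E := dirSet (v_b :: rest) v_b with hE
  show growB E (PySem.Set.ofList [0]) 3 = true ↔ _
  rw [show (3 : Nat) = 0+1+1+1 from rfl]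
  simp only [growB_succ, growB_zero, and_true]
  unfold Phi3
  rw [← hE]
  simp only [PySem.Set.mem_union, PySem.Set.mem_ofList, List.mem_map, List.mem_singleton,
    exists_eq_left, PySem.Int.bxor_zero, not_or, forall_eq, forall_exists_index, and_imp, or_imp]
  constructor
  · rintro ⟨d1, hd1E, hd1z, -, d2, hd2E, ⟨hd2z, hd21⟩, hcl2, d3, hd3E, ⟨⟨hd3z, hd31⟩, hne⟩, hcl3⟩
    have hd32 : d3 ≠ d2 := fun h =>
      hne ⟨0, Or.inl rfl, by rw [PySem.Int.bxor_zero]; exact h.symm⟩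
    have hd3p : d3 ≠ PySem.Int.bxor d1 d2 := fun h =>
      hne ⟨d1, Or.inr rfl, by rw [PySem.Int.bxor_comm]; exact h.symm⟩
    refine ⟨d1, hd1E, hd1z, d2, hd2E, hd2z, fun h => hd21 h.symm, ?_, d3, hd3E, hd3z,
      fun h => hd31 h.symm, hd32, hd3p, ?_, ?_, ?_⟩
    · have h := (hcl2 d1).2 rfl
      rwa [PySem.Int.bxor_comm] at h
    · have h := (hcl3 d1).1.2 rfl
      rwa [PySem.Int.bxor_comm] at h
    · have h := ((hcl3 d2).2 0).1 rfl (PySem.Int.bxor_zero d2)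
      rwa [PySem.Int.bxor_comm] at h
    · have h := ((hcl3 (PySem.Int.bxor d2 d1)).2 d1).2 rfl rfl
      rwa [PySem.Int.bxor_comm d3, PySem.Int.bxor_comm d2 d1] at h
  · rintro ⟨d1, hd1E, hd1z, d2, hd2E, hd2z, hd21, hdc, d3, hd3E, hd3z, hd31, hd32, hd3p, he1, he2, he3⟩
    refine ⟨d1, hd1E, hd1z, hd1E, d2, hd2E, ⟨hd2z, fun h => hd21 h.symm⟩, ?_, d3, hd3E,
      ⟨⟨hd3z, fun h => hd31 h.symm⟩, ?_⟩, ?_⟩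
    · intro s
      refine ⟨fun h => ?_, fun h => ?_⟩
      · rw [h, PySem.Int.bxor_zero]; exact hd2E
      · rw [← h, PySem.Int.bxor_comm]; exact hdc
    · rintro ⟨a, rfl | rfl, h⟩
      · rw [PySem.Int.bxor_zero] at h; exact hd32 h.symm
      · rw [PySem.Int.bxor_comm] at h; exact hd3p h.symm
    · intro s
      refine ⟨⟨fun h => ?_, fun h => ?_⟩, fun x => ⟨fun hx hs => ?_, fun hx hs => ?_⟩⟩
      · rw [h, PySem.Int.bxor_zero]; exact hd3E
      · rw [← h, PySem.Int.bxor_comm]; exact he1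
      · subst hx; rw [PySem.Int.bxor_zero] at hs
        rw [← hs, PySem.Int.bxor_comm]; exact he2
      · subst hx; rw [← hs, PySem.Int.bxor_comm d3, PySem.Int.bxor_comm d2 d1]; exact he3

-- ===== VERDICT (by name: the statement is the Claim_ definition above) =====
theorem does_have_3flat_spec : Claim_equal_does_have_3flat := by
  intro A _ hpre
  unfold Spec_does_have_3flat
  obtain ⟨v_b, rest, rfl⟩ : ∃ x xs, A = x :: xs := by
    cases A with
    | nil => exact absurd rfl hpre
    | cons x xs => exact ⟨x, xs, rfl⟩
  rw [Bool.eq_iff_iff, a_iff_phi, b_iff_phi]
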